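-- pv_equiv track=rewrite | github.com/avinash201199/DSA-Questions | Matrix/Python/Largest_Rectangle_Of_0.py | calculateR
-- ===== SOURCE A (Python) =====
-- n = 8
--
-- def calculateR(histogram):
--     R = []
--     for x in range(n - 1, -1, -1):
--         i = x + 1
--         while i <= n - 1 and histogram[i] >= histogram[x]:
--             i = R[n - 1 - i] + 1
--         R.append(i - 1)
--     # swap order of R
--     R.reverse()
--     return R
-- ===== SOURCE B (Python) =====
-- n = 8
--
-- def calculateR(histogram):
--     R = []
--     for x in range(n):
--         i = x + 1
--         while i <= n - 1 and histogram[i] >= histogram[x]: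
--             i += 1
--         R.append(i - 1)
--     return R
-- ===== Notes on version B (the rewrite author's own statement) =====
-- stated objective: simpler
-- what changed: A fills R right-to-left and its inner while JUMPS through previously computed R entries (i = R[n-1-i]+1) then reverses; B scans left-to-right and its inner while steps one index at a time (i += 1) without consulting R at all, so no table reuse and no final reverse.
import Mathlib
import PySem

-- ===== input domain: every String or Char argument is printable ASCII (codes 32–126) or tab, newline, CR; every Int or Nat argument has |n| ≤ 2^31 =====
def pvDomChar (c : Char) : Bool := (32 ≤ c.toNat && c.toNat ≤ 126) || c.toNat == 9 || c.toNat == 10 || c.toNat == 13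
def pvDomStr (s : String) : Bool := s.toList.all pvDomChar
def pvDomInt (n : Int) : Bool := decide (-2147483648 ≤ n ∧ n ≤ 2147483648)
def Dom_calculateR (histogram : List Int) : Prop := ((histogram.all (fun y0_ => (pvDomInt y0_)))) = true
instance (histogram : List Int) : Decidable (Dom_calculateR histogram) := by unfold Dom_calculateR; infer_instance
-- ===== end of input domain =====

-- B replaces A's jump-pointer inner loop (which reuses the R table) by a plain one-step
-- forward scan and builds R left-to-right, dropping the final reverse; objective: simpler.

-- histogram[i] for the (always nonnegative, under Pre_ in-range) indices both loops use;
-- exact under Pre_ (PySem.Raise.InRange histogram.length i holds for every access performed).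
def pvH (hist : List Int) (i : Int) : Int := PySem.List.pyGetD hist i 0

-- ===== PORT A =====
-- A's inner 'while i <= n-1 and histogram[i] >= histogram[x]: i = R[n-1-i]+1' (n = 8).
-- fuel only makes the same computation total: 16 exceeds the ≤ 8 iterations Python's loop
-- performs (each jump strictly increases i ≤ 8), proved in pvJumpA_eq_scan below.
def pvJumpA (hist R : List Int) (c : Int) : Int → Nat → Int
  | i, 0 => i
  | i, f+1 =>
    if i ≤ 7 ∧ pvH hist i ≥ c then
      pvJumpA hist R c ((PySem.List.pyGetD R (7 - i) 0) + 1) f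
    else i

def calculateR (histogram : List Int) : List Int :=
  ((PySem.List.pyRange 7 (-1) (-1)).foldl
    (fun R x => R ++ [pvJumpA histogram R (pvH histogram x) (x + 1) 16 - 1]) []).reverse

-- ===== PORT B =====
-- B's inner 'while i <= n-1 and histogram[i] >= histogram[x]: i += 1' (terminates as i grows).
def pvScanB (hist : List Int) (c : Int) (i : Int) : Int :=
  if h : i ≤ 7 ∧ pvH hist i ≥ c then pvScanB hist c (i + 1) else i
termination_by (8 - i).toNat
decreasing_by omega

def calculateR_alt (histogram : List Int) : List Int :=
  (PySem.List.pyRange 0 8 1).foldl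
    (fun R x => R ++ [pvScanB histogram (pvH histogram x) (x + 1) - 1]) []

-- ===== PRECONDITION & SPEC =====
-- Python A indexes histogram[0..7] (module constant n = 8): on lists shorter than 8 it
-- raises IndexError, so exactly those are excluded (B raises there too).
def Pre_calculateR (histogram : List Int) : Prop := 8 ≤ histogram.length
instance (histogram : List Int) : Decidable (Pre_calculateR histogram) := by unfold Pre_calculateR; infer_instance
def pvWitness_calculateR : List Int := [2, 1, 4, 5, 1, 3, 3, 2]

def Spec_calculateR (histogram : List Int) (out : List Int) : Prop := out = calculateR_alt histogram
instance (histogram : List Int) (out : List Int) : Decidable (Spec_calculateR histogram out) := by unfold Spec_calculateR; infer_instance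

-- ===== CLAIM (what is proved, stated in full; the proofs are below) =====
def Claim_equal_calculateR : Prop := ∀ (histogram : List Int), Dom_calculateR histogram → Pre_calculateR histogram → Spec_calculateR histogram (calculateR histogram)

-- ===== LEMMAS AND PROOFS =====

theorem pvScanB_ge (hist : List Int) (c i : Int) : i ≤ pvScanB hist c i := by
  fun_induction pvScanB with
  | case1 i h ih => omega
  | case2 i h => omega

theorem pvScanB_le (hist : List Int) (c i : Int) (h : i ≤ 8) : pvScanB hist c i ≤ 8 := by
  fun_induction pvScanB with
  | case1 i hc ih => exact ih (by omega)
  | case2 i hc => omega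

theorem pvScanB_between (hist : List Int) (c i j : Int) (h1 : i ≤ j)
    (h2 : j < pvScanB hist c i) : j ≤ 7 ∧ pvH hist j ≥ c := by
  fun_induction pvScanB generalizing j with
  | case1 i hc ih =>
    rcases eq_or_lt_of_le h1 with rfl | hlt
    · exact hc
    · exact ih j (by omega) h2
  | case2 i hc => omega

theorem pvScanB_skip (hist : List Int) (c i m : Int) (h1 : i ≤ m)
    (h2 : ∀ j : Int, i ≤ j → j < m → j ≤ 7 ∧ pvH hist j ≥ c) :
    pvScanB hist c i = pvScanB hist c m := by
  by_cases hm : i = m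
  · rw [hm]
  · have hi : i ≤ 7 ∧ pvH hist i ≥ c := h2 i le_rfl (by omega)
    rw [pvScanB, dif_pos hi]
    exact pvScanB_skip hist c (i+1) m (by omega) (fun j hj1 hj2 => h2 j (by omega) hj2)
termination_by (m - i).toNat
decreasing_by omega

-- A's jump 'i = R[n-1-i]+1' lands where B's one-step scan would have walked anyway
theorem pvScanB_jump (hist : List Int) (c i : Int) (h7 : i ≤ 7) (hge : pvH hist i ≥ c) :
    pvScanB hist c i = pvScanB hist c (pvScanB hist (pvH hist i) (i + 1)) := by
  rw [pvScanB, dif_pos ⟨h7, hge⟩]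
  exact pvScanB_skip hist c (i+1) _ (pvScanB_ge hist _ (i+1))
    (fun j hj1 hj2 =>
      have h := pvScanB_between hist (pvH hist i) (i+1) j hj1 hj2
      ⟨h.1, le_trans hge h.2⟩)

-- with a correct table for all indices > x, A's fueled jump loop equals B's scan
theorem pvJumpA_eq_scan (hist R : List Int) (x : Int)
    (hR : ∀ k : Int, x < k → k ≤ 7 →
      PySem.List.pyGetD R (7 - k) 0 = pvScanB hist (pvH hist k) (k + 1) - 1) :
    ∀ (f : Nat) (i c : Int), x < i → i ≤ 8 → (9 - i).toNat ≤ f →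
      pvJumpA hist R c i f = pvScanB hist c i := by
  intro f
  induction f with
  | zero => intro i c h1 h2 h3; omega
  | succ f ih =>
    intro i c h1 h2 h3
    by_cases hc : i ≤ 7 ∧ pvH hist i ≥ c
    · rw [pvJumpA, if_pos hc, hR i h1 hc.1]
      have hge := pvScanB_ge hist (pvH hist i) (i + 1)
      have hle := pvScanB_le hist (pvH hist i) (i + 1) (by omega)
      rw [ih _ c (by omega) (by omega) (by omega),
        sub_add_cancel, ← pvScanB_jump hist c i hc.1 hc.2]
    · rw [pvJumpA, if_neg hc, pvScanB, dif_neg hc]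

-- R after A has processed x = 7, 6, …, 8 - m (entries for indices 7 down to 8 - m)
def pvTbl (hist : List Int) (m : Nat) : List Int :=
  (List.range m).map (fun (j : Nat) => pvScanB hist (pvH hist (7 - (j : Int))) (7 - (j : Int) + 1) - 1)

theorem pvTbl_lookup (hist : List Int) (m : Nat) (k : Int)
    (h1 : 7 - (m : Int) < k) (h2 : k ≤ 7) :
    PySem.List.pyGetD (pvTbl hist m) (7 - k) 0 = pvScanB hist (pvH hist k) (k + 1) - 1 := by
  have hk : 7 - k = ((7 - k).toNat : Int) := by omega
  rw [hk, PySem.List.pyGetD_natCast]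
  have hlt : (7 - k).toNat < m := by omega
  unfold pvTbl
  rw [PySem.List.getD_map_range _ _ _ _ hlt]
  have e : 7 - (((7 - k).toNat : Nat) : Int) = k := by omega
  rw [e]

theorem pvCountdown_snoc (a b : Int) (h : b < a) :
    PySem.List.pyRange a b (-1) = PySem.List.pyRange a (b + 1) (-1) ++ [b + 1] := by
  rw [PySem.List.pyRange_neg_one_eq_reverse, PySem.List.pyRange_neg_one_eq_reverse,
    PySem.List.pyRange_one_cons (by omega)]
  simp

theorem pvFold_eq (hist : List Int) : ∀ m : Nat, m ≤ 8 →
    ((PySem.List.pyRange 7 (7 - (m : Int)) (-1)).foldl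
      (fun R x => R ++ [pvJumpA hist R (pvH hist x) (x + 1) 16 - 1]) []) = pvTbl hist m := by
  intro m
  induction m with
  | zero => intro _; rw [PySem.List.pyRange_neg_one_eq_nil (by norm_num)]; rfl
  | succ m ih =>
    intro hm
    rw [pvCountdown_snoc _ _ (by push_cast; omega)]
    have e : (7 : Int) - ((m + 1 : Nat) : Int) + 1 = 7 - (m : Int) := by push_cast; ring
    rw [e, List.foldl_append, ih (by omega)]
    have hj : pvJumpA hist (pvTbl hist m) (pvH hist (7 - (m : Int))) (7 - (m : Int) + 1) 16
        = pvScanB hist (pvH hist (7 - (m : Int))) (7 - (m : Int) + 1) := by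
      refine pvJumpA_eq_scan hist (pvTbl hist m) (7 - (m : Int))
        (fun k hk1 hk2 => pvTbl_lookup hist m k hk1 hk2) 16 _ _ (by omega) (by omega) (by omega)
    simp only [List.foldl_cons, List.foldl_nil, hj]
    simp [pvTbl, List.range_succ]

-- ===== VERDICT (by name: the statement is the Claim_ definition above) =====
theorem calculateR_spec : Claim_equal_calculateR := by
  intro hist _ _
  unfold Spec_calculateR calculateR calculateR_alt
  have e : PySem.List.pyRange 7 (-1) (-1) = PySem.List.pyRange 7 (7 - ((8 : Nat) : Int)) (-1) := by
    norm_num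
  rw [e, pvFold_eq hist 8 le_rfl]
  have e2 : PySem.List.pyRange 0 8 1 = [0, 1, 2, 3, 4, 5, 6, 7] := by decide
  rw [e2]
  norm_num [pvTbl, List.range_succ, List.foldl]
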